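-- pv_equiv track=rewrite | github.com/zxk19981227/BertGCN | source/tokenize_sentence.py | convert_data_to_index
-- ===== SOURCE A (Python) =====
-- def convert_data_to_index(context):
--     dictionary = {}
--     index_context = []
--     context_length = len(context)
--     for line in context:
--         line = line.strip().lower().split(' ')
--         for word in line:
--             if word not in dictionary.keys():
--                 dictionary[word] = len(dictionary.keys()) + context_length
--         index_context.append([dictionary[each] for each in line])
--     return dictionary, index_context
-- ===== SOURCE B (Python) =====
-- def convert_data_to_index(context):
--     context_length = len(context)
--     dictionary = {}
--     # pass 1: vocabulary construction only
--     for line in context: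
--         for word in line.strip().lower().split(' '):
--             if word not in dictionary:
--                 dictionary[word] = len(dictionary) + context_length
--     # pass 2: encode every line through the completed dictionary
--     index_context = [[dictionary[w] for w in line.strip().lower().split(' ')]
--                      for line in context]
--     return dictionary, index_context
-- ===== Notes on version B (the rewrite author's own statement) =====
-- stated objective: alternative
-- what changed: Splits A's fused single pass into two separately-shaped passes: one loop that only builds the word-index dictionary, then a comprehension that encodes every line through the completed dictionary (correct because indices of already-seen words never change).
import Mathlib
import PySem

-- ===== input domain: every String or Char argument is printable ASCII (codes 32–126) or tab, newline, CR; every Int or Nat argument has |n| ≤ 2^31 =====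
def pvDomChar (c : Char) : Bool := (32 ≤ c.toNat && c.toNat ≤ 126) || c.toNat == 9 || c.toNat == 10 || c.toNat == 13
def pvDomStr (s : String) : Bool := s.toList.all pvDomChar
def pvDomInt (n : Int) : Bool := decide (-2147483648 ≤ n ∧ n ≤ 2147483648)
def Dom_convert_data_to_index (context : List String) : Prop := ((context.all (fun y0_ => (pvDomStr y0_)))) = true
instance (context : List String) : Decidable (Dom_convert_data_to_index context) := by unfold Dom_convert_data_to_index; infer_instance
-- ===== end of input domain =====

-- B replaces A's fused single pass by two passes: build the dictionary first, then encode
-- every line through the completed dictionary (objective: alternative decomposition).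

-- ===== PORT A =====
-- line.strip().lower().split(' ')
def pvTok (line : String) : List String :=
  (PySem.Str.split? (PySem.Str.lower (PySem.Str.strip line)) " ").getD []

-- if word not in dictionary.keys(): dictionary[word] = len(dictionary.keys()) + context_length
def pvAdd (cl : Int) (d : PySem.Dict String Int) (w : String) : PySem.Dict String Int :=
  if d.contains w then d else d.insert w ((d.size : Int) + cl)

def convert_data_to_index (context : List String) : (List (String × Int)) × List (List Int) :=
  let cl : Int := context.length
  let st := context.foldl
    (fun (st : PySem.Dict String Int × List (List Int)) line =>
      (((pvTok line).foldl (pvAdd cl) st.1),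
       st.2 ++ [((pvTok line).map (fun w => ((pvTok line).foldl (pvAdd cl) st.1).getD w 0))]))
    (PySem.Dict.empty, ([] : List (List Int)))
  (st.1.items, st.2)

-- ===== PORT B =====
-- B's pass 1 tokenizes and adds words with the same expressions as A (shared helpers pvTok, pvAdd);
-- its shape differs: dictionary built alone first, then a separate encoding map over the lines.
def convert_data_to_index_alt (context : List String) : (List (String × Int)) × List (List Int) :=
  let cl : Int := context.length
  let d := context.foldl (fun d line => (pvTok line).foldl (pvAdd cl) d) PySem.Dict.empty
  (d.items, context.map (fun line => (pvTok line).map (fun w => d.getD w 0)))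

-- ===== PRECONDITION & SPEC =====
def Spec_convert_data_to_index (context : List String) (out : (List (String × Int)) × List (List Int)) : Prop := out = convert_data_to_index_alt context
instance (context : List String) (out : (List (String × Int)) × List (List Int)) : Decidable (Spec_convert_data_to_index context out) := by unfold Spec_convert_data_to_index; infer_instance

-- ===== CLAIM (what is proved, stated in full; the proofs are below) =====
def Claim_equal_convert_data_to_index : Prop := ∀ (context : List String), Dom_convert_data_to_index context → Spec_convert_data_to_index context (convert_data_to_index context)

-- ===== LEMMAS AND PROOFS =====

-- an existing binding survives the word-adding fold over one line
theorem pvAdd_stable (cl : Int) (ws : List String) (d : PySem.Dict String Int)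
    (w : String) (v : Int) (h : d.get? w = some v) :
    (ws.foldl (pvAdd cl) d).get? w = some v := by
  induction ws generalizing d with
  | nil => simpa using h
  | cons a rest ih =>
    simp only [List.foldl_cons]
    apply ih
    unfold pvAdd
    by_cases hc : d.contains a
    · simpa [hc] using h
    · rw [if_neg hc]
      rcases eq_or_ne w a with rfl | hne
      · rw [PySem.Dict.contains_eq_isSome_get?, h] at hc; simp at hc
      · rw [PySem.Dict.get?_insert_of_ne d _ hne]; exact h

-- an existing binding survives the fold over all lines
theorem pvAdd_stable_lines (cl : Int) (ls : List String) (d : PySem.Dict String Int)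
    (w : String) (v : Int) (h : d.get? w = some v) :
    (ls.foldl (fun d l => (pvTok l).foldl (pvAdd cl) d) d).get? w = some v := by
  induction ls generalizing d with
  | nil => simpa using h
  | cons a rest ih =>
    simp only [List.foldl_cons]
    exact ih _ (pvAdd_stable cl _ d w v h)

-- after the fold over a line, every word of that line is bound
theorem pvAdd_mem (cl : Int) (ws : List String) (d : PySem.Dict String Int)
    (w : String) (hw : w ∈ ws) :
    ((ws.foldl (pvAdd cl) d).get? w).isSome := by
  induction ws generalizing d with
  | nil => cases hw
  | cons a rest ih =>
    simp only [List.foldl_cons]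
    rcases List.mem_cons.mp hw with rfl | hw'
    · have hsome : ((pvAdd cl d w).get? w).isSome := by
        unfold pvAdd
        by_cases hc : d.contains w
        · simp only [hc, if_true]
          rw [← PySem.Dict.contains_eq_isSome_get?]; exact hc
        · simp [hc, PySem.Dict.get?_insert_self]
      rcases Option.isSome_iff_exists.mp hsome with ⟨v, hv⟩
      rw [pvAdd_stable cl rest _ w v hv]; rfl
    · exact ih _ hw'

-- A's fused fold equals: final dictionary, plus each line encoded through it
theorem pvMain (cl : Int) (ls : List String) (d0 : PySem.Dict String Int)
    (acc : List (List Int)) :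
    ls.foldl
      (fun (st : PySem.Dict String Int × List (List Int)) line =>
        (((pvTok line).foldl (pvAdd cl) st.1),
         st.2 ++ [((pvTok line).map (fun w => ((pvTok line).foldl (pvAdd cl) st.1).getD w 0))]))
      (d0, acc)
    = (ls.foldl (fun d l => (pvTok l).foldl (pvAdd cl) d) d0,
       acc ++ ls.map (fun l => (pvTok l).map
         (fun w => (ls.foldl (fun d l => (pvTok l).foldl (pvAdd cl) d) d0).getD w 0))) := by
  induction ls generalizing d0 acc with
  | nil => simp
  | cons line rest ih =>
    simp only [List.foldl_cons, List.map_cons]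
    rw [ih]
    have henc : (pvTok line).map (fun w => ((pvTok line).foldl (pvAdd cl) d0).getD w 0)
        = (pvTok line).map (fun w =>
            (rest.foldl (fun d l => (pvTok l).foldl (pvAdd cl) d)
              ((pvTok line).foldl (pvAdd cl) d0)).getD w 0) := by
      apply List.map_congr_left
      intro w hw
      rcases Option.isSome_iff_exists.mp (pvAdd_mem cl _ d0 w hw) with ⟨v, hv⟩
      rw [PySem.Dict.getD_eq_get?_getD, hv, PySem.Dict.getD_eq_get?_getD,
          pvAdd_stable_lines cl rest _ w v hv]
    rw [henc]
    simp

-- ===== VERDICT (by name: the statement is the Claim_ definition above) =====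
theorem convert_data_to_index_spec : Claim_equal_convert_data_to_index := by
  intro context _
  unfold Spec_convert_data_to_index convert_data_to_index convert_data_to_index_alt
  dsimp only
  rw [pvMain]
  simp
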